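-- pv_equiv track=rewrite | github.com/myoungwoo111-ui/leerjsgur | app.py | render_macro_chart
-- ===== SOURCE A (Python) =====
-- def render_macro_chart(history):
--     if not history: return "<div class='baccarat-board'></div>"
--
--     # 같으면 아래로, 틀리면 옆으로 이동하는 2차원 배열 로직
--     cols, current_col = [], [history[0]]
--     for i in range(1, len(history)):
--         if history[i] == history[i-1]:
--             current_col.append(history[i])
--         else:
--             cols.append(current_col)
--             current_col = [history[i]]
--     cols.append(current_col)
--
--     html = "<div class='baccarat-board'>"
--     for col in cols:
--         html += "<div class='col-unit'>"
--         for item in col: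
--             cls = "p-mark" if item == "P" else "b-mark"
--             html += f"<span class='{cls}'>{item}</span>"
--         html += "</div>"
--     html += "</div>"
--     return html
-- ===== SOURCE B (Python) =====
-- def render_macro_chart(history):
--     if not history:
--         return "<div class='baccarat-board'></div>"
--     parts = ["<div class='baccarat-board'>", "<div class='col-unit'>"]
--     prev = None
--     for item in history:
--         if prev is not None and item != prev:
--             parts.append("</div>")
--             parts.append("<div class='col-unit'>")
--         cls = "p-mark" if item == "P" else "b-mark"
--         parts.append(f"<span class='{cls}'>{item}</span>")
--         prev = item
--     parts.append("</div>")
--     parts.append("</div>")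
--     return "".join(parts)
-- ===== Notes on version B (the rewrite author's own statement) =====
-- stated objective: simpler
-- what changed: B drops the intermediate list of columns entirely and renders in a single pass, emitting column-boundary tags when the current item differs from the previous one, collecting parts into a list joined once.
import Mathlib
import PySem

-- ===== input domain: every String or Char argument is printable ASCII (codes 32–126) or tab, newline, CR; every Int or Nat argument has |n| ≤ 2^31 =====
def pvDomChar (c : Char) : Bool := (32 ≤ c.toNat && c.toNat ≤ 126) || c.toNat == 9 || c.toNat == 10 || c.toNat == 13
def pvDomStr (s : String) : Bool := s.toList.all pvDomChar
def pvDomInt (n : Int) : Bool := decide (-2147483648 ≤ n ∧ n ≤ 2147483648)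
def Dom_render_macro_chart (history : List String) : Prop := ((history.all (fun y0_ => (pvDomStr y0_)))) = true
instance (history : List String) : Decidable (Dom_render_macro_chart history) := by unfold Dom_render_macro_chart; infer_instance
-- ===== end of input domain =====

-- B renders the grouped columns in a single pass (no intermediate column list), collecting parts joined once: simpler decomposition, same value.


-- ===== PORT A =====
-- first loop of A: walk the tail comparing each item to the previous one, growing cols / current_col
def aGroup : List String → String → List (List String) → List String → List (List String)
  | [], _, cols, cur => cols ++ [cur]
  | x :: xs, prev, cols, cur =>
    if x == prev then aGroup xs x cols (cur ++ [x])
    else aGroup xs x (cols ++ [cur]) [x]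

def render_macro_chart (history : List String) : String :=
  match history with
  | [] => "<div class='baccarat-board'></div>"
  | h :: t =>
    let cols := aGroup t h [] [h]
    let html := cols.foldl (fun html col =>
      (col.foldl (fun acc item =>
        let cls := if item == "P" then "p-mark" else "b-mark"
        acc ++ "<span class='" ++ cls ++ "'>" ++ item ++ "</span>")
        (html ++ "<div class='col-unit'>")) ++ "</div>")
      "<div class='baccarat-board'>"
    html ++ "</div>"

-- ===== PORT B =====
def bSpan (item : String) : String :=
  let cls := if item == "P" then "p-mark" else "b-mark"
  "<span class='" ++ cls ++ "'>" ++ item ++ "</span>"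

-- B's single pass: emit close/open tags whenever the item differs from the previous one
def bLoop : List String → String → List String → List String
  | [], _, parts => parts
  | x :: xs, prev, parts =>
    let parts' := if x ≠ prev then parts ++ ["</div>", "<div class='col-unit'>"] else parts
    bLoop xs x (parts' ++ [bSpan x])

def render_macro_chart_alt (history : List String) : String :=
  match history with
  | [] => "<div class='baccarat-board'></div>"
  | h :: t =>
    String.join (bLoop t h ["<div class='baccarat-board'>", "<div class='col-unit'>", bSpan h]
      ++ ["</div>", "</div>"])

-- ===== PRECONDITION & SPEC =====
def Spec_render_macro_chart (history : List String) (out : String) : Prop := out = render_macro_chart_alt history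
instance (history : List String) (out : String) : Decidable (Spec_render_macro_chart history out) := by unfold Spec_render_macro_chart; infer_instance

-- ===== CLAIM (what is proved, stated in full; the proofs are below) =====
def Claim_equal_render_macro_chart : Prop := ∀ (history : List String), Dom_render_macro_chart history → Spec_render_macro_chart history (render_macro_chart history)

-- ===== LEMMAS AND PROOFS =====

theorem str_foldl_acc {α : Type} (f : α → String) (l : List α) (s : String) :
    List.foldl (fun acc i => acc ++ f i) s l = s ++ List.foldl (fun acc i => acc ++ f i) "" l := by
  induction l generalizing s with
  | nil => simp
  | cons x xs ih =>
    simp only [List.foldl_cons]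
    rw [ih (s ++ f x), ih ("" ++ f x)]
    simp [String.append_assoc]

theorem join_str (l : List String) (s : String) :
    List.foldl (fun r t => r ++ t) s l = s ++ String.join l := by
  induction l generalizing s with
  | nil => simp [String.join]
  | cons x xs ih =>
    simp only [List.foldl_cons, String.join]
    rw [ih (s ++ x), ih ("" ++ x)]
    simp [String.append_assoc]

theorem join_cons (x : String) (l : List String) :
    String.join (x :: l) = x ++ String.join l := by
  rw [show String.join (x :: l) = List.foldl (fun r t => r ++ t) ("" ++ x) l from rfl, join_str]
  simp [String.join]

theorem join_nil : String.join ([] : List String) = "" := rfl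

theorem join_map {α : Type} (f : α → String) (l : List α) :
    String.join (l.map f) = List.foldl (fun acc c => acc ++ f c) "" l := by
  induction l with
  | nil => simp [String.join]
  | cons x xs ih =>
    simp only [List.map_cons, join_cons, List.foldl_cons, ih]
    rw [str_foldl_acc f xs ("" ++ f x)]
    simp [String.append_assoc]

theorem join_append (a b : List String) : String.join (a ++ b) = String.join a ++ String.join b := by
  induction a with
  | nil => simp [String.join]
  | cons x xs ih => simp [join_cons, ih, String.append_assoc]

def spans (col : List String) : String :=
  List.foldl (fun acc i => acc ++ bSpan i) "" col

def colHtml (col : List String) : String :=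
  "<div class='col-unit'>" ++ spans col ++ "</div>"

theorem spans_foldl (col : List String) (s : String) :
    col.foldl (fun acc item =>
      let cls := if item == "P" then "p-mark" else "b-mark"
      acc ++ "<span class='" ++ cls ++ "'>" ++ item ++ "</span>") s
    = s ++ spans col := by
  have hfun : (fun (acc item : String) =>
      let cls := if item == "P" then "p-mark" else "b-mark"
      acc ++ "<span class='" ++ cls ++ "'>" ++ item ++ "</span>")
      = fun acc i => acc ++ bSpan i := by
    funext acc i
    simp [bSpan, String.append_assoc]
  rw [hfun]
  exact str_foldl_acc bSpan col s

theorem outer_foldl (cols : List (List String)) (s : String) :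
    cols.foldl (fun html col =>
      (col.foldl (fun acc item =>
        let cls := if item == "P" then "p-mark" else "b-mark"
        acc ++ "<span class='" ++ cls ++ "'>" ++ item ++ "</span>")
        (html ++ "<div class='col-unit'>")) ++ "</div>") s
    = s ++ String.join (cols.map colHtml) := by
  have hfun : (fun (html : String) (col : List String) =>
      (col.foldl (fun acc item =>
        let cls := if item == "P" then "p-mark" else "b-mark"
        acc ++ "<span class='" ++ cls ++ "'>" ++ item ++ "</span>")
        (html ++ "<div class='col-unit'>")) ++ "</div>")
      = fun html col => html ++ colHtml col := by
    funext html col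
    rw [spans_foldl]
    simp [colHtml, String.append_assoc]
  rw [hfun, str_foldl_acc colHtml cols s, join_map]

theorem bLoop_acc (xs : List String) (prev : String) (p q : List String) :
    bLoop xs prev (p ++ q) = p ++ bLoop xs prev q := by
  induction xs generalizing prev q with
  | nil => simp [bLoop]
  | cons x xs ih =>
    simp only [bLoop]
    by_cases hx : x ≠ prev
    · rw [if_pos hx, if_pos hx]
      simpa [List.append_assoc] using ih x (q ++ ["</div>", "<div class='col-unit'>"] ++ [bSpan x])
    · rw [if_neg hx, if_neg hx]
      simpa [List.append_assoc] using ih x (q ++ [bSpan x])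

theorem spans_snoc (cur : List String) (x : String) :
    spans (cur ++ [x]) = spans cur ++ bSpan x := by
  simp [spans, List.foldl_append]

theorem main_inv (xs : List String) (prev : String) (cols : List (List String)) (cur : List String) :
    String.join ((aGroup xs prev cols cur).map colHtml)
    = String.join (cols.map colHtml) ++ "<div class='col-unit'>" ++ spans cur
        ++ String.join (bLoop xs prev []) ++ "</div>" := by
  induction xs generalizing prev cols cur with
  | nil =>
    simp [aGroup, bLoop, join_append, join_cons, join_nil, colHtml, String.append_assoc]
  | cons x xs ih =>
    simp only [aGroup, bLoop]
    by_cases hx : x = prev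
    · have hb : (x == prev) = true := by simp [hx]
      rw [if_pos hb, if_neg (by simp [hx] : ¬ x ≠ prev)]
      rw [ih, show ([] : List String) ++ [bSpan x] = [bSpan x] ++ [] by simp,
          bLoop_acc xs x [bSpan x] [], spans_snoc, join_append, join_cons, hx]
      simp [join_str, join_nil, String.append_assoc]
    · have hb : (x == prev) = false := by simp [hx]
      rw [if_neg (by simp [hb]), if_pos hx]
      rw [ih, show ([] : List String) ++ ["</div>", "<div class='col-unit'>"] ++ [bSpan x]
            = ["</div>", "<div class='col-unit'>", bSpan x] ++ [] by simp,
          bLoop_acc xs x _ []]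
      simp [join_append, join_cons, join_nil, spans, colHtml, join_str, String.append_assoc]
      rw [← String.append_assoc]
      rfl

-- ===== VERDICT (by name: the statement is the Claim_ definition above) =====
theorem render_macro_chart_spec : Claim_equal_render_macro_chart := by
  intro history _
  unfold Spec_render_macro_chart
  cases history with
  | nil => rfl
  | cons h t =>
    simp only [render_macro_chart, render_macro_chart_alt]
    rw [outer_foldl, main_inv,
        show bLoop t h ["<div class='baccarat-board'>", "<div class='col-unit'>", bSpan h]
          = ["<div class='baccarat-board'>", "<div class='col-unit'>", bSpan h] ++ bLoop t h [] from by
            simpa using bLoop_acc t h ["<div class='baccarat-board'>", "<div class='col-unit'>", bSpan h] []]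
    simp [join_append, join_cons, join_nil, spans, join_str, String.append_assoc]
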